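-- pv_equiv track=rewrite | github.com/collinsakenga/codewars_solutions | 6 kyu/6 kyu_Simple reversed parenthesis.py | solve
-- ===== SOURCE A (Python) =====
-- def solve(s):
--     if len(s)%2:
--         return -1
--     total=count=0
--     for i in s:
--         if i==")":
--             count-=1
--         elif i=="(":
--             count+=1
--         if count<0:
--             count=1
--             total+=1
--     return total+count//2
-- ===== SOURCE B (Python) =====
-- def solve(s):
--     if len(s) % 2:
--         return -1
--     deltas = [1 if ch == "(" else -1 for ch in s if ch in "()"]
--     prefixes = [0]
--     for d in deltas:
--         prefixes.append(prefixes[-1] + d)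
--     low = min(prefixes)
--     c = -low
--     o = prefixes[-1] - low
--     return (c + 1) // 2 + (c % 2 + o) // 2
-- ===== Notes on version B (the rewrite author's own statement) =====
-- stated objective: alternative
-- what changed: Replaces A's fused accumulator with negative-reset-to-1 trick by a staged pipeline: map brackets to +1/-1 deltas, build the prefix-sum list, take its minimum (unmatched closes = -low, unmatched opens = last-low), and combine with the closed-form swap formula (c+1)//2 + (c%2+o)//2.
import Mathlib
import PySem

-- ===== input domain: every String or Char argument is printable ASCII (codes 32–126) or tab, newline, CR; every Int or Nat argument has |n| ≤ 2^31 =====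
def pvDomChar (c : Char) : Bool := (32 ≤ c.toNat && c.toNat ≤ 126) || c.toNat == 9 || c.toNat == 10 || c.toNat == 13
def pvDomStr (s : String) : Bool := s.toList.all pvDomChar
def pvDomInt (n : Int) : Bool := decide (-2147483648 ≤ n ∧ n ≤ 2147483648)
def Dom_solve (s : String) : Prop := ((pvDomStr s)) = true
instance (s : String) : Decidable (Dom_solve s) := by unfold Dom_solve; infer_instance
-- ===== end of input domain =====

-- B replaces A's fused accumulator-with-negative-reset by a staged pipeline: bracket deltas, prefix-sum list, its minimum, then a closed-form formula (alternative decomposition, same cost).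


-- ===== PORT A =====
def solveLoop (st : Int × Int) (ch : Char) : Int × Int :=
  let count := if ch = ')' then st.2 - 1 else if ch = '(' then st.2 + 1 else st.2
  if count < 0 then (st.1 + 1, 1) else (st.1, count)

def solve (s : String) : Int :=
  if s.toList.length % 2 = 1 then -1
  else
    let r := s.toList.foldl solveLoop (0, 0)
    r.1 + PySem.Int.floordiv r.2 2

-- ===== PORT B =====
def solveDeltas (l : List Char) : List Int :=
  (l.filter (fun ch => ch = '(' ∨ ch = ')')).map (fun ch => if ch = '(' then (1 : Int) else -1)

def solve_alt (s : String) : Int :=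
  if s.toList.length % 2 = 1 then -1
  else
    let deltas := solveDeltas s.toList
    let prefixes := deltas.foldl (fun pre d => pre ++ [pre.getLastD 0 + d]) [(0 : Int)]
    let low := (PySem.List.min? prefixes (fun x => x)).getD 0
    let c := -low
    let o := prefixes.getLastD 0 - low
    PySem.Int.floordiv (c + 1) 2 + PySem.Int.floordiv (PySem.Int.mod c 2 + o) 2

-- ===== PRECONDITION & SPEC =====
def Spec_solve (s : String) (out : Int) : Prop := out = solve_alt s
instance (s : String) (out : Int) : Decidable (Spec_solve s out) := by unfold Spec_solve; infer_instance

-- ===== CLAIM (what is proved, stated in full; the proofs are below) =====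
def Claim_equal_solve : Prop := ∀ (s : String), Dom_solve s → Spec_solve s (solve s)

-- ===== LEMMAS AND PROOFS =====

-- the prefix-sum list built by B's loop, as a structural recursion
def pvPref (a : Int) : List Int → List Int
  | [] => [a]
  | d :: ds => a :: pvPref (a + d) ds

-- the minimum of pvPref a ds
def pvMin (a : Int) : List Int → Int
  | [] => a
  | d :: ds => min a (pvMin (a + d) ds)

theorem pvMin_le_self (a : Int) (ds : List Int) : pvMin a ds ≤ a := by
  cases ds <;> simp [pvMin]

theorem pvMin_add (a b : Int) (ds : List Int) : pvMin (a + b) ds = a + pvMin b ds := by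
  induction ds generalizing b with
  | nil => simp [pvMin]
  | cons d ds ih =>
      simp only [pvMin]
      rw [add_assoc, ih (b + d)]
      omega

theorem pvMin_shift (a : Int) (ds : List Int) : pvMin a ds = a + pvMin 0 ds := by
  rw [← pvMin_add a 0, add_zero]

theorem pvPref_getLastD' (a : Int) (ds : List Int) : ∀ (x : Int), (pvPref a ds).getLastD x = a + ds.sum := by
  induction ds generalizing a with
  | nil => intro x; simp [pvPref]
  | cons d ds ih =>
      intro x
      rw [pvPref, List.getLastD_cons, ih]
      simp
      omega

theorem pvPref_getLastD (a : Int) (ds : List Int) : (pvPref a ds).getLastD 0 = a + ds.sum :=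
  pvPref_getLastD' a ds 0

theorem pvPref_fold (ds : List Int) : ∀ (acc : List Int), acc ≠ [] →
    ds.foldl (fun pre d => pre ++ [pre.getLastD 0 + d]) acc
      = acc.dropLast ++ pvPref (acc.getLastD 0) ds := by
  induction ds with
  | nil =>
      intro acc h
      rw [List.foldl_nil, pvPref, List.getLastD_eq_getLast?, List.getLast?_eq_getLast_of_ne_nil h]
      simp [List.dropLast_concat_getLast h]
  | cons d ds ih =>
      intro acc h
      have hne : acc ++ [acc.getLastD 0 + d] ≠ [] := by simp
      rw [List.foldl_cons, ih _ hne]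
      have h1 : (acc ++ [acc.getLastD 0 + d]).getLastD 0 = acc.getLastD 0 + d := by
        simp [List.getLastD_eq_getLast?]
      have h2 : (acc ++ [acc.getLastD 0 + d]).dropLast = acc := by
        simp
      have key : acc.dropLast ++ [acc.getLastD 0] = acc := by
        rw [List.getLastD_eq_getLast?, List.getLast?_eq_getLast_of_ne_nil h]
        simp [List.dropLast_concat_getLast h]
      rw [h1, h2, pvPref]
      conv_lhs => rw [← key]
      simp

theorem pvPref_foldl_min (ds : List Int) : ∀ (a x : Int),
    (pvPref a ds).foldl min x = min x (pvMin a ds) := by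
  induction ds with
  | nil => intro a x; simp [pvPref, pvMin]
  | cons d ds ih =>
      intro a x
      rw [pvPref, pvMin, List.foldl_cons, ih, min_assoc]

theorem pvMin_min? (a : Int) (ds : List Int) :
    (PySem.List.min? (pvPref a ds) (fun x => x)).getD 0 = pvMin a ds := by
  cases ds with
  | nil => simp [pvPref, pvMin, PySem.List.min?_id_cons]
  | cons d ds =>
      rw [pvPref, PySem.List.min?_id_cons, Option.getD_some, pvPref_foldl_min, pvMin]

-- invariant linking A's (total, count) to (run, low) of B's prefix sums
def PvRel (a : Int × Int) (r m : Int) : Prop :=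
  m ≤ 0 ∧ m ≤ r ∧ 2 * a.1 = -m + (-m) % 2 ∧ a.2 = r - m + (-m) % 2

theorem Rel_foldl (l : List Char) : ∀ (a : Int × Int) (r m : Int), PvRel a r m →
    PvRel (l.foldl solveLoop a)
      (r + (solveDeltas l).sum) (min m (r + pvMin 0 (solveDeltas l))) := by
  induction l with
  | nil =>
      intro a r m h
      obtain ⟨h1, h2, h3, h4⟩ := h
      have e1 : min m (r + pvMin 0 (solveDeltas [])) = m := by
        simp [solveDeltas, pvMin]
        omega
      have e2 : r + (solveDeltas []).sum = r := by simp [solveDeltas]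
      rw [e1, e2]
      exact ⟨h1, h2, h3, h4⟩
  | cons ch t ih =>
      intro a r m h
      obtain ⟨h1, h2, h3, h4⟩ := h
      have hc2 : 0 ≤ a.2 := by omega
      rw [List.foldl_cons]
      by_cases hp : ch = '('
      · have hd : solveDeltas (ch :: t) = 1 :: solveDeltas t := by
          simp [solveDeltas, hp]
        have hstep : solveLoop a ch = (a.1, a.2 + 1) := by
          simp only [solveLoop, hp]
          split_ifs <;> first | rfl | (exfalso; omega) | simp_all
        rw [hstep, hd]
        have hres := ih (a.1, a.2 + 1) (r + 1) m ⟨h1, by omega, h3, by simp; omega⟩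
        have hm : pvMin 0 (solveDeltas t) ≤ 0 := pvMin_le_self _ _
        have hmin : min m (r + 1 + pvMin 0 (solveDeltas t))
            = min m (r + pvMin 0 (1 :: solveDeltas t)) := by
          rw [pvMin, zero_add, pvMin_shift 1]
          simp only [min_def]
          split_ifs <;> omega
        have hsum : r + 1 + (solveDeltas t).sum = r + (1 :: solveDeltas t).sum := by
          simp; omega
        rw [← hsum, ← hmin]
        exact hres
      · by_cases hq : ch = ')'
        · have hd : solveDeltas (ch :: t) = -1 :: solveDeltas t := by
            simp [solveDeltas, hq]
          rw [hd]
          have hm : pvMin 0 (solveDeltas t) ≤ 0 := pvMin_le_self _ _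
          have hmin : min (min m (r - 1)) (r - 1 + pvMin 0 (solveDeltas t))
              = min m (r + pvMin 0 (-1 :: solveDeltas t)) := by
            rw [pvMin, zero_add, pvMin_shift (-1)]
            simp only [min_def]
            split_ifs <;> omega
          have hsum : r - 1 + (solveDeltas t).sum = r + (-1 :: solveDeltas t).sum := by
            simp; omega
          rw [← hsum, ← hmin]
          by_cases hz : a.2 - 1 < 0
          · have hstep : solveLoop a ch = (a.1 + 1, 1) := by
              simp only [solveLoop, hq]
              split_ifs <;> rfl
            rw [hstep]
            refine ih (a.1 + 1, 1) (r - 1) (min m (r - 1)) ?_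
            simp only [PvRel, min_def]
            split_ifs <;> simp <;> omega
          · have hstep : solveLoop a ch = (a.1, a.2 - 1) := by
              simp only [solveLoop, hq]
              split_ifs <;> rfl
            rw [hstep]
            refine ih (a.1, a.2 - 1) (r - 1) (min m (r - 1)) ?_
            simp only [PvRel, min_def]
            split_ifs <;> simp <;> omega
        · have hd : solveDeltas (ch :: t) = solveDeltas t := by
            simp [solveDeltas, hp, hq]
          have hstep : solveLoop a ch = a := by
            simp only [solveLoop]
            split_ifs <;> first | rfl | (exfalso; omega)
          rw [hstep, hd]
          exact ih a r m ⟨h1, h2, h3, h4⟩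

-- ===== VERDICT (by name: the statement is the Claim_ definition above) =====
theorem solve_spec : Claim_equal_solve := by
  unfold Claim_equal_solve
  intro s _
  unfold Spec_solve solve solve_alt
  by_cases hl : s.toList.length % 2 = 1
  · rw [if_pos hl, if_pos hl]
  · rw [if_neg hl, if_neg hl]
    have hrel := Rel_foldl s.toList (0, 0) 0 0 ⟨le_refl 0, le_refl 0, by simp, by simp⟩
    set ds := solveDeltas s.toList with hds
    have hmle : pvMin 0 ds ≤ 0 := pvMin_le_self _ _
    have hmin0 : min 0 (0 + pvMin 0 ds) = pvMin 0 ds := by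
      simp [min_def]
      omega
    rw [hmin0, zero_add] at hrel
    obtain ⟨h1, h2, h3, h4⟩ := hrel
    set rA := s.toList.foldl solveLoop ((0 : Int), (0 : Int))
    have hpf : ds.foldl (fun pre d => pre ++ [pre.getLastD 0 + d]) [(0 : Int)]
        = pvPref 0 ds := by
      have := pvPref_fold ds [(0 : Int)] (by simp)
      simpa using this
    simp only [hpf, pvMin_min?, pvPref_getLastD]
    rw [PySem.Int.floordiv_eq_ediv_of_pos (by omega),
        PySem.Int.floordiv_eq_ediv_of_pos (by omega),
        PySem.Int.floordiv_eq_ediv_of_pos (by omega),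
        PySem.Int.mod_eq_emod_of_pos (by omega)]
    omega
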